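-- pv_equiv track=rewrite | github.com/alanphar/lanphar | passing_yearbooks.py | findSignatureCounts
-- ===== SOURCE A (Python) =====
-- def findSignatureCounts(arr):
--    students = list(range(1, len(arr) + 1))
--    signature_counts = [1] * len(arr)
--
--    for student in students:
--       for index in range(student - 1, -1, -1):
--          if arr[index] == student:
--            break
--          signature_counts[student - 1] += 1
--    return signature_counts
-- ===== SOURCE B (Python) =====
-- def findSignatureCounts(arr):
--     last = {}
--     res = []
--     for i, v in enumerate(arr):
--         last[v] = i
--         s = i + 1
--         res.append(s - last[s] if s in last else s + 1)
--     return res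
-- ===== Notes on version B (the rewrite author's own statement) =====
-- stated objective: faster
-- what changed: Replaced the per-student backward rescans with one forward pass that records the last seen index of each value in a dict; the count for student s is s - last[s] (or s + 1 if s has not appeared), eliminating the inner loop.
import Mathlib
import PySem

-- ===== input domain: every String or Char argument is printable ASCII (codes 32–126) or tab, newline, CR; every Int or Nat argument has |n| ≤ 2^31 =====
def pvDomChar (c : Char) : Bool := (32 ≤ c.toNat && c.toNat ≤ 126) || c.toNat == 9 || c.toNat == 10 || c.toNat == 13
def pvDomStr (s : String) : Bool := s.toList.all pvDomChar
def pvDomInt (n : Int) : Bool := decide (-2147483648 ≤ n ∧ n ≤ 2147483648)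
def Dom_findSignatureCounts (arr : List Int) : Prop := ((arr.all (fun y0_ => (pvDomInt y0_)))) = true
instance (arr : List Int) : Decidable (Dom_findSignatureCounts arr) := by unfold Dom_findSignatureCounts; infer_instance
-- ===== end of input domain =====

-- B replaces A's per-student backward rescans by a single forward pass that records the
-- last index of each value in a dict (objective: faster); return values proved equal.

-- ===== PORT A =====
-- inner loop 'for index in range(student-1,-1,-1)' with its break; arr[index] and
-- signature_counts[student-1] are always in range when called from findSignatureCounts,
-- so pyGetD/pySetD are exact there
def pvInnerA (arr : List Int) (student : Int) : List Int → List Int → List Int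
  | [], counts => counts
  | i :: rest, counts =>
    if PySem.List.pyGetD arr i 0 = student then counts
    else pvInnerA arr student rest
      (PySem.List.pySetD counts (student - 1) (PySem.List.pyGetD counts (student - 1) 0 + 1))

def findSignatureCounts (arr : List Int) : List Int :=
  (PySem.List.pyRange 1 ((arr.length : Int) + 1) 1).foldl
    (fun counts student =>
      pvInnerA arr student (PySem.List.pyRange (student - 1) (-1) (-1)) counts)
    (List.replicate arr.length 1)

-- ===== PORT B =====
def findSignatureCounts_alt (arr : List Int) : List Int :=
  ((PySem.List.enumerate arr 0).foldl
    (fun (st : PySem.Dict Int Int × List Int) p =>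
      let last := st.1.insert p.2 p.1
      let s := p.1 + 1
      (last, st.2 ++ [match last.get? s with | some j => s - j | none => s + 1]))
    (PySem.Dict.empty, [])).2

-- ===== PRECONDITION & SPEC =====
def Spec_findSignatureCounts (arr : List Int) (out : List Int) : Prop := out = findSignatureCounts_alt arr
instance (arr : List Int) (out : List Int) : Decidable (Spec_findSignatureCounts arr out) := by unfold Spec_findSignatureCounts; infer_instance

-- ===== CLAIM (what is proved, stated in full; the proofs are below) =====
def Claim_equal_findSignatureCounts : Prop := ∀ (arr : List Int), Dom_findSignatureCounts arr → Spec_findSignatureCounts arr (findSignatureCounts arr)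

-- ===== LEMMAS AND PROOFS =====

-- the last j ≤ k with arr[j] = v, located by downward search, and the common per-student value:
-- student k+1 signs (k+1) - j copies if arr[j] = k+1 last occurs at j ≤ k, else k+2
def pvDFind (arr : List Int) (v : Int) : Nat → Option Nat
  | 0 => if arr.getD 0 0 = v then some 0 else none
  | k+1 => if arr.getD (k+1) 0 = v then some (k+1) else pvDFind arr v k

def pvSpecVal (arr : List Int) (k : Nat) : Int :=
  match pvDFind arr (k+1) k with
  | some j => (k + 1 : Int) - j
  | none => (k : Int) + 2

-- number of increments performed by A's inner loop over the index list
def pvScan (arr : List Int) (v : Int) : List Int → Int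
  | [] => 0
  | i :: rest => if PySem.List.pyGetD arr i 0 = v then 0 else 1 + pvScan arr v rest

theorem pvInnerA_eq (arr : List Int) (t : Nat) (idxs : List Int) (counts : List Int)
    (ht : t < counts.length) :
    pvInnerA arr ((t : Int) + 1) idxs counts
      = counts.set t (counts.getD t 0 + pvScan arr ((t : Int) + 1) idxs) := by
  induction idxs generalizing counts with
  | nil =>
    simp only [pvInnerA, pvScan, add_zero, List.getD]
    rw [List.getElem?_eq_getElem ht]; simp
  | cons i rest ih =>
    rw [pvInnerA, pvScan]
    split_ifs with h
    · simp only [add_zero, List.getD]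
      rw [List.getElem?_eq_getElem ht]; simp
    · have e1 : (t : Int) + 1 - 1 = (t : Int) := by ring
      rw [e1, PySem.List.pySetD_natCast, PySem.List.pyGetD_natCast]
      rw [ih _ (by simpa using ht)]
      rw [List.set_set]
      congr 1
      rw [List.getD_eq_getElem _ _ (by simpa using ht)]
      simp
      ring

theorem pvScan_eq (arr : List Int) (v : Int) (k : Nat) :
    pvScan arr v (PySem.List.pyRange (k : Int) (-1) (-1))
      = match pvDFind arr v k with
        | some j => (k : Int) - j
        | none => (k : Int) + 1 := by
  induction k with
  | zero =>
    rw [PySem.List.pyRange_neg_one_cons (by norm_num),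
        PySem.List.pyRange_neg_one_eq_nil (by norm_num)]
    simp only [Nat.cast_zero, pvScan, pvDFind, PySem.List.pyGetD_zero]
    split_ifs <;> simp
  | succ k ih =>
    rw [show ((k+1 : Nat) : Int) = (k : Int) + 1 by push_cast; ring]
    rw [PySem.List.pyRange_neg_one_cons (by omega)]
    rw [show (k : Int) + 1 - 1 = (k : Int) by ring]
    simp only [pvScan, pvDFind]
    rw [show PySem.List.pyGetD arr ((k:Int)+1) 0 = arr.getD (k+1) 0 by
      rw [show ((k:Int)+1) = ((k+1 : Nat) : Int) by push_cast; ring, PySem.List.pyGetD_natCast]]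
    split_ifs with h
    · push_cast; ring
    · rw [ih]
      cases pvDFind arr v k <;> simp <;> ring

theorem pvSpecVal_eq (arr : List Int) (k : Nat) :
    pvSpecVal arr k = 1 + pvScan arr ((k : Int) + 1) (PySem.List.pyRange (k : Int) (-1) (-1)) := by
  rw [pvScan_eq, pvSpecVal]
  cases pvDFind arr ((k:Int)+1) k <;> simp <;> ring

theorem pvA_outer (arr : List Int) (m : Nat) (hm : m ≤ arr.length) :
    (PySem.List.pyRange 1 ((m : Int) + 1) 1).foldl
      (fun counts student =>
        pvInnerA arr student (PySem.List.pyRange (student - 1) (-1) (-1)) counts)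
      (List.replicate arr.length 1)
      = (List.range m).map (pvSpecVal arr) ++ List.replicate (arr.length - m) (1 : Int) := by
  induction m with
  | zero =>
    rw [PySem.List.pyRange_one_eq_nil (by norm_num)]
    simp
  | succ m ih =>
    have hm' : m ≤ arr.length := by omega
    rw [show ((m+1 : Nat) : Int) + 1 = ((m : Int) + 1) + 1 by push_cast; ring]
    rw [PySem.List.pyRange_one_succ_right (by omega), List.foldl_append, ih hm']
    simp only [List.foldl_cons, List.foldl_nil]
    rw [show (m : Int) + 1 - 1 = (m : Int) by ring]
    rw [pvInnerA_eq arr m _ _ (by simp; omega)]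
    have hlen : ((List.range m).map (pvSpecVal arr)).length = m := by simp
    have hrep : arr.length - m = (arr.length - (m+1)) + 1 := by omega
    rw [hrep, List.replicate_succ]
    rw [List.getD_append_right ((List.range m).map (pvSpecVal arr))
      ((1:Int) :: List.replicate (arr.length - (m+1)) 1) 0 m (by simp)]
    rw [List.set_append_right (s := (List.range m).map (pvSpecVal arr))
      (t := (1:Int) :: List.replicate (arr.length - (m+1)) 1) m _ (by simp)]
    simp only [hlen, Nat.sub_self, List.getD, List.getElem?_cons_zero, Option.getD_some,
      List.set_cons_zero, List.range_succ, List.map_append, List.map_cons, List.map_nil,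
      List.append_assoc, List.cons_append, List.nil_append]
    rw [pvSpecVal_eq]

theorem pvA_eq_map (arr : List Int) :
    findSignatureCounts arr = (List.range arr.length).map (pvSpecVal arr) := by
  unfold findSignatureCounts
  rw [pvA_outer arr arr.length le_rfl]; simp

-- B-side: the dict built so far and what its lookups mean
def pvBStep (st : PySem.Dict Int Int × List Int) (p : Int × Int) : PySem.Dict Int Int × List Int :=
  let last := st.1.insert p.2 p.1
  let s := p.1 + 1
  (last, st.2 ++ [match last.get? s with | some j => s - j | none => s + 1])

def pvBDict (xs : List Int) : PySem.Dict Int Int :=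
  (PySem.List.enumerate xs 0).foldl (fun d p => d.insert p.2 p.1) PySem.Dict.empty

def pvLast (xs : List Int) (v : Int) : Option Nat :=
  match xs with
  | [] => none
  | _ => pvDFind xs v (xs.length - 1)

theorem pvDFind_append (xs : List Int) (x v : Int) (k : Nat) (hk : k < xs.length) :
    pvDFind (xs ++ [x]) v k = pvDFind xs v k := by
  induction k with
  | zero =>
    have : (xs ++ [x]).getD 0 0 = xs.getD 0 0 := by
      rw [List.getD_append _ _ _ _ (by omega)]
    simp only [pvDFind, this]
  | succ k ih =>
    have : (xs ++ [x]).getD (k+1) 0 = xs.getD (k+1) 0 := by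
      rw [List.getD_append _ _ _ _ (by omega)]
    rw [pvDFind, pvDFind, this, ih (by omega)]

theorem pvBDict_append (xs : List Int) (x : Int) :
    pvBDict (xs ++ [x]) = (pvBDict xs).insert x (xs.length : Int) := by
  unfold pvBDict
  rw [PySem.List.enumerate_append, List.foldl_append]
  simp [PySem.List.enumerate]

theorem pvLast_append_self (xs : List Int) (x : Int) :
    pvLast (xs ++ [x]) x = some xs.length := by
  cases hxs : xs.length with
  | zero =>
    rw [List.length_eq_zero_iff.mp hxs]
    simp [pvLast, pvDFind]
  | succ m =>
    have hget : (xs ++ [x]).getD (m+1) 0 = x := by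
      rw [List.getD_eq_getElem _ _ (by simp [hxs]), List.getElem_append_right (by omega)]
      simp [hxs]
    cases xs with
    | nil => simp at hxs
    | cons y ys =>
      simp only [pvLast, List.cons_append]
      rw [show (y :: (ys ++ [x])).length - 1 = m + 1 from by simp at hxs ⊢; omega]
      rw [pvDFind]
      rw [show (y :: (ys ++ [x])).getD (m+1) 0 = x from hget]
      simp

theorem pvLast_append_ne (xs : List Int) (x v : Int) (hv : v ≠ x) :
    pvLast (xs ++ [x]) v = pvLast xs v := by
  cases hxs : xs.length with
  | zero =>
    rw [List.length_eq_zero_iff.mp hxs]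
    simp [pvLast, pvDFind, hv.symm]
  | succ m =>
    have hget : (xs ++ [x]).getD (m+1) 0 = x := by
      rw [List.getD_eq_getElem _ _ (by simp [hxs]), List.getElem_append_right (by omega)]
      simp [hxs]
    cases xs with
    | nil => simp at hxs
    | cons y ys =>
      simp only [pvLast, List.cons_append]
      rw [show (y :: (ys ++ [x])).length - 1 = m + 1 from by simp at hxs ⊢; omega]
      rw [pvDFind]
      rw [show (y :: (ys ++ [x])).getD (m+1) 0 = x from hget]
      rw [if_neg (fun h => hv h.symm)]
      rw [show (y :: ys).length - 1 = m from by simp [hxs]]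
      have : m < (y :: ys).length := by simp [hxs]
      exact pvDFind_append _ _ _ _ this

theorem pvBDict_get (xs : List Int) (v : Int) :
    (pvBDict xs).get? v = (pvLast xs v).map (fun j => (j : Int)) := by
  induction xs using List.reverseRecOn with
  | nil => simp [pvBDict, pvLast, PySem.List.enumerate]
  | append_singleton xs x ih =>
    rw [pvBDict_append]
    by_cases hv : v = x
    · subst hv
      rw [PySem.Dict.get?_insert_self, pvLast_append_self]
      simp
    · rw [PySem.Dict.get?_insert, if_neg hv, pvLast_append_ne _ _ _ hv, ih]

theorem pvSpecVal_append (xs : List Int) (x : Int) (k : Nat) (hk : k < xs.length) :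
    pvSpecVal (xs ++ [x]) k = pvSpecVal xs k := by
  unfold pvSpecVal
  rw [pvDFind_append _ _ _ _ hk]

theorem pvB_inv (xs : List Int) :
    (PySem.List.enumerate xs 0).foldl pvBStep (PySem.Dict.empty, [])
      = (pvBDict xs, (List.range xs.length).map (pvSpecVal xs)) := by
  induction xs using List.reverseRecOn with
  | nil => simp [pvBDict, PySem.List.enumerate]
  | append_singleton xs x ih =>
    rw [PySem.List.enumerate_append, List.foldl_append, ih]
    have hstep : ∀ d r, List.foldl pvBStep (d, r) (PySem.List.enumerate [x] (0 + (xs.length : Int)))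
        = (d.insert x (xs.length : Int),
           r ++ [match (d.insert x (xs.length : Int)).get? ((xs.length : Int) + 1) with
                 | some j => (xs.length : Int) + 1 - j | none => (xs.length : Int) + 1 + 1]) := by
      intro d r
      simp [PySem.List.enumerate, pvBStep]
    rw [hstep]
    rw [← pvBDict_append]
    have hget : (pvBDict (xs ++ [x])).get? ((xs.length : Int) + 1)
        = (pvLast (xs ++ [x]) ((xs.length : Int) + 1)).map (fun j => (j : Int)) := pvBDict_get _ _
    have hlast : pvLast (xs ++ [x]) ((xs.length : Int) + 1)
        = pvDFind (xs ++ [x]) ((xs.length : Int) + 1) xs.length := by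
      cases xs <;> simp [pvLast]
    refine Prod.ext rfl ?_
    show List.map (pvSpecVal xs) (List.range xs.length) ++ _ = _
    rw [List.length_append, List.length_singleton, List.range_succ, List.map_append,
      List.map_singleton]
    congr 1
    · exact List.map_congr_left fun k hk =>
        (pvSpecVal_append xs x k (List.mem_range.mp hk)).symm
    · rw [hget, hlast]
      unfold pvSpecVal
      cases h : pvDFind (xs ++ [x]) ((xs.length : Int) + 1) xs.length with
      | none => simp; ring
      | some j => simp

theorem pvB_eq_map (arr : List Int) :
    findSignatureCounts_alt arr = (List.range arr.length).map (pvSpecVal arr) := by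
  show ((PySem.List.enumerate arr 0).foldl pvBStep (PySem.Dict.empty, [])).2 = _
  rw [pvB_inv]

-- ===== VERDICT (by name: the statement is the Claim_ definition above) =====
theorem findSignatureCounts_spec : Claim_equal_findSignatureCounts := by
  intro arr _
  unfold Spec_findSignatureCounts
  rw [pvA_eq_map, pvB_eq_map]
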